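-- pv_equiv track=rewrite | github.com/eduardoleon9010/python_en_accion | scripts/tupla_1.py | contar_votos_estado
-- ===== SOURCE A (Python) =====
-- def contar_votos_estado(votos: list, estado_interes: str) -> tuple:
--     """
--     Cuenta los votos para cada candidato en un estado específico.
--
--     Parámetros:
--     votos (list): Lista de tuplas de votos, cada una con (id_voto, candidato, estado, condado).
--     estado_interes (str): El estado del cual se quieren contar los votos.
--
--     Retorna:
--     tuple: Tupla con la cantidad de votos para Trump y Biden en el estado de interés.
--     """
--     cant_votos_trump = 0
--     cant_votos_biden = 0
--
--     for voto_actual in votos: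
--        id_voto, candidato, estado, condado = voto_actual
--
--        if estado == estado_interes:
--            if candidato == "Donald Trump":
--                cant_votos_trump += 1
--            else:
--                cant_votos_biden += 1
--
--     return (cant_votos_trump, cant_votos_biden)
-- ===== SOURCE B (Python) =====
-- def contar_votos_estado(votos: list, estado_interes: str) -> tuple:
--     total = sum(1 for (id_voto, candidato, estado, condado) in votos
--                 if estado == estado_interes)
--     trump = sum(1 for (id_voto, candidato, estado, condado) in votos
--                 if estado == estado_interes and candidato == "Donald Trump")
--     return (trump, total - trump)
-- ===== Notes on version B (the rewrite author's own statement) =====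
-- stated objective: alternative
-- what changed: Replaces the branch-maintained dual counter with two aggregate counts (state total and Trump-in-state) and derives the Biden count arithmetically as total minus trump.
import Mathlib
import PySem

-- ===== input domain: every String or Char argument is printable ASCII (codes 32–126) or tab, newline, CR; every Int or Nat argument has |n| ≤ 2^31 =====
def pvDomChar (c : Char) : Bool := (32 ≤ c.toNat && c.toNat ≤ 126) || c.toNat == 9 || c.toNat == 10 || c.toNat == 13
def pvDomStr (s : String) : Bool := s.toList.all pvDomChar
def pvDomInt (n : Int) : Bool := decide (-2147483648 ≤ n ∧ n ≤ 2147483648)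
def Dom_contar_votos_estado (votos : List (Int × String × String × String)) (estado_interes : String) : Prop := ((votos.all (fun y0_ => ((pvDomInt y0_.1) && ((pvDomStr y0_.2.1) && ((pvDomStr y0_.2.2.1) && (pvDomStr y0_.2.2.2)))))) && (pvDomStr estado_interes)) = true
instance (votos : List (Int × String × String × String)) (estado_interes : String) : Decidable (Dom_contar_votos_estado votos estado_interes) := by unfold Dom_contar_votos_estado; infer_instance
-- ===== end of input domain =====

-- ===== PORT A =====
def pasoVoto (estado_interes : String) (acc : Int × Int) (voto_actual : Int × String × String × String) : Int × Int :=
  let (_id_voto, candidato, estado, _condado) := voto_actual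
  if estado == estado_interes then
    if candidato == "Donald Trump" then (acc.1 + 1, acc.2)
    else (acc.1, acc.2 + 1)
  else acc

def contar_votos_estado (votos : List (Int × String × String × String)) (estado_interes : String) : Int × Int :=
  votos.foldl (pasoVoto estado_interes) (0, 0)

-- ===== PORT B =====
-- B: two aggregate counts; Biden derived as total - trump.
def contar_votos_estado_alt (votos : List (Int × String × String × String)) (estado_interes : String) : Int × Int :=
  let total : Int := (votos.filter (fun v => v.2.2.1 == estado_interes)).length
  let trump : Int := (votos.filter (fun v => v.2.2.1 == estado_interes && v.2.1 == "Donald Trump")).length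
  (trump, total - trump)

-- ===== PRECONDITION & SPEC =====
def Spec_contar_votos_estado (votos : List (Int × String × String × String)) (estado_interes : String) (out : Int × Int) : Prop := out = contar_votos_estado_alt votos estado_interes
instance (votos : List (Int × String × String × String)) (estado_interes : String) (out : Int × Int) : Decidable (Spec_contar_votos_estado votos estado_interes out) := by unfold Spec_contar_votos_estado; infer_instance

-- ===== CLAIM (what is proved, stated in full; the proofs are below) =====
def Claim_equal_contar_votos_estado : Prop := ∀ (votos : List (Int × String × String × String)) (estado_interes : String), Dom_contar_votos_estado votos estado_interes → Spec_contar_votos_estado votos estado_interes (contar_votos_estado votos estado_interes)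

-- ===== LEMMAS AND PROOFS =====

-- ===== VERDICT (by name: the statement is the Claim_ definition above) =====
lemma count_foldl (estado_interes : String) (votos : List (Int × String × String × String))
    (t b : Int) :
    votos.foldl (pasoVoto estado_interes) (t, b)
    = (t + ((votos.filter (fun v => v.2.2.1 == estado_interes && v.2.1 == "Donald Trump")).length : Int),
       b + ((votos.filter (fun v => v.2.2.1 == estado_interes)).length : Int)
         - ((votos.filter (fun v => v.2.2.1 == estado_interes && v.2.1 == "Donald Trump")).length : Int)) := by
  induction votos generalizing t b with
  | nil => simp
  | cons v vs ih =>
    obtain ⟨i, c, e, d⟩ := v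
    rw [List.foldl_cons]
    by_cases he : e == estado_interes
    · by_cases hc : c == "Donald Trump"
      · rw [show pasoVoto estado_interes (t, b) (i, c, e, d) = (t + 1, b) by
          simp [pasoVoto, he, hc], ih]
        simp [he, hc, Prod.ext_iff]; omega
      · rw [show pasoVoto estado_interes (t, b) (i, c, e, d) = (t, b + 1) by
          simp [pasoVoto, he, hc], ih]
        simp [he, hc, Prod.ext_iff]; omega
    · rw [show pasoVoto estado_interes (t, b) (i, c, e, d) = (t, b) by
          simp [pasoVoto, he], ih]
      simp [he, Prod.ext_iff]

theorem contar_votos_estado_spec : Claim_equal_contar_votos_estado := by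
  intro votos estado_interes _
  unfold Spec_contar_votos_estado contar_votos_estado contar_votos_estado_alt
  rw [count_foldl]
  simp
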